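-- pv_equiv track=rewrite | github.com/Teatot/AdventOfCode | Y_2023/day_thirteen/day_thirteen.py | horizontal_sym
-- ===== SOURCE A (Python) =====
-- def horizontal_sym(sector, half_range):
--     maxrow, maxcol = len(sector), len(sector[0])
--     full_range = 2 * half_range
--     for r1 in range(maxrow):
--         mirrored_r1 = full_range + 1 - r1
--         if mirrored_r1 >= maxrow or mirrored_r1 < 0:
--             continue
--         if sector[r1] != sector[mirrored_r1]:
--             return False
--     return True
-- ===== SOURCE B (Python) =====
-- def horizontal_sym(sector, half_range):
--     maxrow = len(sector)
--     lo, hi = half_range, half_range + 1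
--     while lo >= 0 and hi < maxrow:
--         if sector[lo] != sector[hi]:
--             return False
--         lo -= 1
--         hi += 1
--     return True
-- ===== Notes on version B (the rewrite author's own statement) =====
-- stated objective: simpler
-- what changed: Replaced the full scan over all rows (each computing a mirror index and skipping out-of-range ones) with a two-pointer walk outward from the mirror axis that stops at the first boundary, visiting each mirrored pair once instead of every row.
import Mathlib
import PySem

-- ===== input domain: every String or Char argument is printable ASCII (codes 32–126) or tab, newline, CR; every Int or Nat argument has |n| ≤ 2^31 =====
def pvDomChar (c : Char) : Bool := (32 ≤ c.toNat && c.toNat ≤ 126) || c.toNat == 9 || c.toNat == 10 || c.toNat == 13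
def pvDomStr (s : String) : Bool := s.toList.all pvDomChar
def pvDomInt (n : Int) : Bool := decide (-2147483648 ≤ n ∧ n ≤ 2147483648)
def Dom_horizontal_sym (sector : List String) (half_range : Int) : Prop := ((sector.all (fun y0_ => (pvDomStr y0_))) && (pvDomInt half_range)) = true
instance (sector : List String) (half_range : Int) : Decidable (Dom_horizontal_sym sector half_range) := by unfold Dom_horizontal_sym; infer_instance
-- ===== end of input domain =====

-- B replaces A's full row scan (mirror arithmetic + continue per row) with a two-pointer
-- walk outward from the axis; A raises IndexError on an empty sector (len(sector[0])),
-- which Pre_ excludes (B returns True there).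

-- ===== PORT A =====
-- maxrow, maxcol = len(sector), len(sector[0]) : sector[0] raises IndexError on an
-- empty sector; that input is excluded by Pre_horizontal_sym (maxcol itself is unused).
def horizontal_sym (sector : List String) (half_range : Int) : Bool :=
  let maxrow : Int := sector.length
  let full_range : Int := 2 * half_range
  (List.range sector.length).all (fun r1 =>
    let mirrored_r1 : Int := full_range + 1 - (r1 : Int)
    if mirrored_r1 ≥ maxrow ∨ mirrored_r1 < 0 then
      true                                   -- continue
    else
      PySem.List.pyGet? sector ((r1 : Int)) == PySem.List.pyGet? sector mirrored_r1)

-- ===== PORT B =====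
-- the while-loop: lo walks down, hi walks up, compare until a boundary is crossed
def altLoop (sector : List String) (lo hi : Int) : Bool :=
  if h : 0 ≤ lo ∧ hi < (sector.length : Int) then
    if PySem.List.pyGet? sector lo != PySem.List.pyGet? sector hi then false
    else altLoop sector (lo - 1) (hi + 1)
  else true
termination_by (lo + 1).toNat
decreasing_by omega

def horizontal_sym_alt (sector : List String) (half_range : Int) : Bool :=
  altLoop sector half_range (half_range + 1)

-- ===== PRECONDITION & SPEC =====
-- Pre_ excludes only the empty sector list, on which Python A raises IndexError at len(sector[0]).
def Pre_horizontal_sym (sector : List String) (half_range : Int) : Prop := sector ≠ []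
instance (sector : List String) (half_range : Int) : Decidable (Pre_horizontal_sym sector half_range) := by unfold Pre_horizontal_sym; infer_instance
def pvWitness_horizontal_sym : List String × Int := (["#.", "#."], 0)

def Spec_horizontal_sym (sector : List String) (half_range : Int) (out : Bool) : Prop := out = horizontal_sym_alt sector half_range
instance (sector : List String) (half_range : Int) (out : Bool) : Decidable (Spec_horizontal_sym sector half_range out) := by unfold Spec_horizontal_sym; infer_instance

-- ===== CLAIM (what is proved, stated in full; the proofs are below) =====
def Claim_equal_horizontal_sym : Prop := ∀ (sector : List String) (half_range : Int), Dom_horizontal_sym sector half_range → Pre_horizontal_sym sector half_range → Spec_horizontal_sym sector half_range (horizontal_sym sector half_range)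

-- ===== LEMMAS AND PROOFS =====

-- A's loop, as a proposition: every in-range mirrored pair (r, 2h+1-r) is equal.
lemma A_iff (sector : List String) (h : Int) :
    horizontal_sym sector h = true ↔
      ∀ r : Nat, r < sector.length →
        0 ≤ 2 * h + 1 - (r : Int) → 2 * h + 1 - (r : Int) < (sector.length : Int) →
        PySem.List.pyGet? sector (r : Int) = PySem.List.pyGet? sector (2 * h + 1 - (r : Int)) := by
  simp only [horizontal_sym, List.all_eq_true, List.mem_range]
  constructor
  · intro H r hr h0 h1
    have := H r hr
    rw [if_neg (by omega)] at this
    exact eq_of_beq this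
  · intro H r hr
    by_cases hc : 2 * h + 1 - (r : Int) ≥ (sector.length : Int) ∨ 2 * h + 1 - (r : Int) < 0
    · rw [if_pos hc]
    · rw [if_neg hc]
      exact beq_iff_eq.mpr (H r hr (by omega) (by omega))

-- B's loop, as a proposition: for every i between 0 and lo whose partner lo+hi-i is
-- below the length, the pair (i, lo+hi-i) is equal.
lemma altLoop_iff (sector : List String) (lo hi : Int) :
    altLoop sector lo hi = true ↔
      ∀ i : Int, 0 ≤ i → i ≤ lo → lo + hi - i < (sector.length : Int) →
        PySem.List.pyGet? sector i = PySem.List.pyGet? sector (lo + hi - i) := by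
  induction lo, hi using altLoop.induct sector with
  | case1 lo hi hcond hne =>
    rw [altLoop, dif_pos hcond, if_pos hne]
    refine iff_of_false (by simp) ?_
    intro H
    have := H lo hcond.1 le_rfl (by omega)
    rw [show lo + hi - lo = hi by omega] at this
    exact (bne_iff_ne.mp hne) this
  | case2 lo hi hcond hne ih =>
    rw [altLoop, dif_pos hcond, if_neg hne]
    have heq : PySem.List.pyGet? sector lo = PySem.List.pyGet? sector hi := by
      simpa [bne_iff_ne] using hne
    rw [ih]
    constructor
    · intro H i h0 hle hlt
      rcases eq_or_lt_of_le hle with h | h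
      · rw [h, show lo + hi - lo = hi by omega]
        exact heq
      · have := H i h0 (by omega) (by omega)
        rwa [show lo - 1 + (hi + 1) - i = lo + hi - i by omega] at this
    · intro H i h0 hle hlt
      have := H i h0 (by omega) (by omega)
      rwa [show lo - 1 + (hi + 1) - i = lo + hi - i by omega]
  | case3 lo hi hcond =>
    rw [altLoop, dif_neg hcond]
    refine iff_of_true rfl ?_
    intro i h0 hle hlt
    exact absurd ⟨by omega, by omega⟩ hcond

lemma main_eq (sector : List String) (h : Int) :
    horizontal_sym sector h = horizontal_sym_alt sector h := by
  have hA := A_iff sector h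
  have hB := altLoop_iff sector h (h + 1)
  rw [Bool.eq_iff_iff, hA]
  unfold horizontal_sym_alt
  rw [hB]
  constructor
  · -- A's condition implies B's
    intro H i h0 hle hlt
    have e : h + (h + 1) - i = 2 * h + 1 - i := by omega
    rw [e]
    -- partner j = 2h+1-i satisfies j ≥ h+1 > i ≥ 0, j < n, hence i < n too
    have hi_lt : (i : Int) < (sector.length : Int) := by omega
    obtain ⟨r, hr⟩ : ∃ r : Nat, (r : Int) = i := ⟨i.toNat, by omega⟩
    rw [← hr]
    exact H r (by omega) (by omega) (by omega)
  · -- B's condition implies A's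
    intro H r hr h0 h1
    by_cases hcase : (r : Int) ≤ h
    · have := H (r : Int) (by positivity) hcase (by omega)
      have e : h + (h + 1) - (r : Int) = 2 * h + 1 - (r : Int) := by omega
      rwa [e] at this
    · -- r > h: apply B at the partner m = 2h+1-r ≤ h, whose own partner is r
      set m : Int := 2 * h + 1 - (r : Int) with hm
      have := H m h0 (by omega) (by omega)
      have e : h + (h + 1) - m = (r : Int) := by omega
      rw [e] at this
      exact this.symm

-- ===== VERDICT (by name: the statement is the Claim_ definition above) =====
theorem horizontal_sym_spec : Claim_equal_horizontal_sym := by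
  intro sector half_range _ _
  unfold Spec_horizontal_sym
  exact main_eq sector half_range
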